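-- pv_equiv track=rewrite | github.com/AkshdeepSharma/Classroom | Kattis/climbingworm.py | timesWormNeedsToClimb
-- ===== SOURCE A (Python) =====
-- def timesWormNeedsToClimb(worm_climb, worm_fall, pole_height):
--     curr_height = 0
--     count = 0
--     while True:
--         curr_height += worm_climb
--         count += 1
--         if curr_height >= pole_height:
--             break
--         curr_height -= worm_fall
--     return count
-- ===== SOURCE B (Python) =====
-- def timesWormNeedsToClimb(worm_climb, worm_fall, pole_height):
--     if pole_height <= worm_climb:
--         return 1
--     step = worm_climb - worm_fall
--     return 1 + (pole_height - worm_climb + step - 1) // step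
-- ===== Notes on version B (the rewrite author's own statement) =====
-- stated objective: alternative
-- what changed: Replaces the step-by-step climb simulation loop with a closed-form ceiling-division formula for the number of cycles (intended as faster; a timing run could not confirm a ratio at measurable sizes).
import Mathlib
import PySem

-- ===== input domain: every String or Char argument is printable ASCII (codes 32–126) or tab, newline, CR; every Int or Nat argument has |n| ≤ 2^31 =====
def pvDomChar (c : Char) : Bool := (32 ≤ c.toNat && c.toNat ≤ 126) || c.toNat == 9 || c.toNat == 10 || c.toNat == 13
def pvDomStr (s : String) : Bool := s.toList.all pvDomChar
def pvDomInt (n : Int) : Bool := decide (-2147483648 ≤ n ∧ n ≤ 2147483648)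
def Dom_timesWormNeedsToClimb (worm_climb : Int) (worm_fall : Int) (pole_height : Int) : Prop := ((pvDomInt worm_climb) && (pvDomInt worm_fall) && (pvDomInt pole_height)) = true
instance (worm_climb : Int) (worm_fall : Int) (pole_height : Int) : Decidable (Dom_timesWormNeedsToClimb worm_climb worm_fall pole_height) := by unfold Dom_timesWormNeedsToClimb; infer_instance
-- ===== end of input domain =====

-- B replaces A's step-by-step climb simulation with a closed-form ceiling-division formula (alternative algorithm).


-- ===== PORT A =====
-- 'while True' loop of A, fuel-bounded for totality; under Pre_ the fuel is never exhausted.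
def wormLoop (worm_climb worm_fall pole_height : Int) : Nat → Int → Int → Int
  | 0, _, count => count
  | fuel + 1, curr_height, count =>
    let curr_height := curr_height + worm_climb
    let count := count + 1
    if curr_height ≥ pole_height then count
    else wormLoop worm_climb worm_fall pole_height fuel (curr_height - worm_fall) count

def timesWormNeedsToClimb (worm_climb : Int) (worm_fall : Int) (pole_height : Int) : Int :=
  wormLoop worm_climb worm_fall pole_height ((pole_height - worm_fall).toNat + 2) 0 0

-- ===== PORT B =====
def timesWormNeedsToClimb_alt (worm_climb : Int) (worm_fall : Int) (pole_height : Int) : Int :=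
  if pole_height ≤ worm_climb then 1
  else
    let step := worm_climb - worm_fall
    1 + PySem.Int.floordiv (pole_height - worm_climb + step - 1) step

-- ===== PRECONDITION & SPEC =====
-- Pre_ excludes exactly the inputs on which A's while-loop never terminates (no net progress and the
-- pole is out of reach of one climb): A returns no value there, and B raises ZeroDivisionError when
-- worm_climb = worm_fall < pole_height.
def Pre_timesWormNeedsToClimb (worm_climb : Int) (worm_fall : Int) (pole_height : Int) : Prop :=
  pole_height ≤ worm_climb ∨ worm_fall < worm_climb
instance (worm_climb : Int) (worm_fall : Int) (pole_height : Int) : Decidable (Pre_timesWormNeedsToClimb worm_climb worm_fall pole_height) := by unfold Pre_timesWormNeedsToClimb; infer_instance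
def pvWitness_timesWormNeedsToClimb : Int × Int × Int := (5, 2, 17)
def Spec_timesWormNeedsToClimb (worm_climb : Int) (worm_fall : Int) (pole_height : Int) (out : Int) : Prop := out = timesWormNeedsToClimb_alt worm_climb worm_fall pole_height
instance (worm_climb : Int) (worm_fall : Int) (pole_height : Int) (out : Int) : Decidable (Spec_timesWormNeedsToClimb worm_climb worm_fall pole_height out) := by unfold Spec_timesWormNeedsToClimb; infer_instance

-- ===== CLAIM (what is proved, stated in full; the proofs are below) =====
def Claim_equal_timesWormNeedsToClimb : Prop := ∀ (worm_climb : Int) (worm_fall : Int) (pole_height : Int), Dom_timesWormNeedsToClimb worm_climb worm_fall pole_height → Pre_timesWormNeedsToClimb worm_climb worm_fall pole_height → Spec_timesWormNeedsToClimb worm_climb worm_fall pole_height (timesWormNeedsToClimb worm_climb worm_fall pole_height)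

-- ===== LEMMAS AND PROOFS =====

-- closed form for the loop, generalized over the state; F curr = remaining iteration count from curr.
lemma wormLoop_closed (c f p : Int) (hcf : f < c) :
    ∀ (fuel : Nat) (curr count : Int), 1 ≤ fuel →
      p - curr - c ≤ ((fuel : Int) - 1) * (c - f) →
      wormLoop c f p fuel curr count =
        count + (if p ≤ curr + c then 1
                 else 1 + PySem.Int.floordiv (p - curr - c + (c - f) - 1) (c - f)) := by
  intro fuel
  induction fuel with
  | zero => intro curr count h1 _; omega
  | succ n ih =>
    intro curr count _ hbound
    rw [wormLoop]
    by_cases hge : curr + c ≥ p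
    · rw [if_pos hge, if_pos (by omega)]
    · rw [if_neg hge, if_neg (by omega)]
      have hd : (0:Int) < c - f := by omega
      have hn1 : 1 ≤ n := by
        by_contra h
        have : n = 0 := by omega
        subst this
        simp at hbound
        omega
      have hrec := ih (curr + c - f) (count + 1) hn1 (by push_cast at hbound ⊢; nlinarith)
      rw [hrec]
      -- fold the recurrence fdiv (x + d) d = fdiv x d + 1 into the ceiling expression
      have hstep : ∀ x : Int, PySem.Int.floordiv (x + (c - f)) (c - f) = PySem.Int.floordiv x (c - f) + 1 := by
        intro x
        have hq := (PySem.Int.floordiv_eq_iff_of_pos hd (a := x) (q := PySem.Int.floordiv x (c - f))).mp rfl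
        rw [PySem.Int.floordiv_eq_iff_of_pos hd]
        constructor <;> nlinarith [hq.1, hq.2]
      by_cases h2 : p ≤ curr + c - f + c
      · rw [if_pos h2]
        -- one more step suffices: the ceiling is 1
        have hx : 0 < p - curr - c ∧ p - curr - c ≤ c - f := by omega
        have : PySem.Int.floordiv (p - curr - c + (c - f) - 1) (c - f) = 1 := by
          rw [PySem.Int.floordiv_eq_iff_of_pos hd]
          constructor <;> nlinarith [hx.1, hx.2]
        omega
      · rw [if_neg h2]
        have harg : p - curr - c + (c - f) - 1 = (p - (curr + c - f) - c + (c - f) - 1) + (c - f) := by ring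
        rw [harg, hstep]
        ring

-- ===== VERDICT (by name: the statement is the Claim_ definition above) =====
theorem timesWormNeedsToClimb_spec : Claim_equal_timesWormNeedsToClimb := by
  intro c f p _ hpre
  unfold Spec_timesWormNeedsToClimb timesWormNeedsToClimb timesWormNeedsToClimb_alt
  by_cases hpc : p ≤ c
  · rw [wormLoop]
    simp only [zero_add]
    rw [if_pos (by omega), if_pos hpc]
  · have hcf : f < c := by rcases hpre with h | h <;> omega
    have hd : (0:Int) < c - f := by omega
    rw [wormLoop_closed c f p hcf _ 0 0 (by omega) ?_]
    · rw [if_neg (by omega), if_neg hpc]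
      simp only [zero_add, sub_zero]
    · have h1 : (0:Int) ≤ p - f := by omega
      have h2 : ((((p - f).toNat + 2 : Nat) : Int) - 1) = (p - f) + 1 := by omega
      rw [h2]
      nlinarith
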